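-- pv_equiv track=rewrite | github.com/k-roy/RECTIFY | rectify/core/consensus.py | _is_homopolymer_position
-- ===== SOURCE A (Python) =====
-- def _is_homopolymer_position(ref_seq: str, rp: int, min_run: int = 3) -> bool:
--     """Return True if reference position rp is within a homopolymer run >= min_run."""
--     if rp < 0 or rp >= len(ref_seq):
--         return False
--     base = ref_seq[rp].upper()
--     if base == 'N':
--         return False
--     left = rp
--     while left > 0 and ref_seq[left - 1].upper() == base:
--         left -= 1
--     right = rp + 1
--     while right < len(ref_seq) and ref_seq[right].upper() == base:
--         right += 1
--     return (right - left) >= min_run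
-- ===== SOURCE B (Python) =====
-- def _is_homopolymer_position(ref_seq: str, rp: int, min_run: int = 3) -> bool:
--     """Return True if reference position rp is within a homopolymer run >= min_run."""
--     if rp < 0 or rp >= len(ref_seq):
--         return False
--     u = ref_seq.upper()
--     # build the full run segmentation [(base, run_length), ...] in one forward pass
--     runs = []
--     i = 0
--     while i < len(u):
--         j = i + 1
--         while j < len(u) and u[j] == u[i]:
--             j += 1
--         runs.append((u[i], j - i))
--         i = j
--     # locate the run whose interval contains rp
--     idx = 0
--     for base, n in runs:
--         if idx <= rp < idx + n:
--             return base != 'N' and n >= min_run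
--         idx += n
--     return False
-- ===== Notes on version B (the rewrite author's own statement) =====
-- stated objective: alternative
-- what changed: Instead of expanding left and right from rp with two while-loops, B upper-cases the sequence once, builds the complete run-length segmentation in a single forward pass, and then returns the verdict for the run whose index interval contains rp.
import Mathlib
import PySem

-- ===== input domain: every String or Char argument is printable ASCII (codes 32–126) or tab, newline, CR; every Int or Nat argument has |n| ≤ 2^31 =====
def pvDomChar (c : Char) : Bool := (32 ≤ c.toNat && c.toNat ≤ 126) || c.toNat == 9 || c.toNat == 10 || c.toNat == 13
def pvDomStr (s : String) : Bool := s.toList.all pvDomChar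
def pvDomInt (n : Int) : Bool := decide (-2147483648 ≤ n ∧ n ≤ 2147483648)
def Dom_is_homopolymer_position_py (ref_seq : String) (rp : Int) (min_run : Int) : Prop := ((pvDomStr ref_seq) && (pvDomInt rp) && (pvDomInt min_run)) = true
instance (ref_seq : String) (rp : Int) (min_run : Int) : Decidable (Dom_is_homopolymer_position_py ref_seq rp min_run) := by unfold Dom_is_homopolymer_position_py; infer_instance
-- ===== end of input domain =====

-- B replaces A's two expand-from-rp while-loops by one forward pass that builds the
-- full run-length segmentation of the upper-cased sequence and then picks the run
-- whose index interval contains rp (objective: alternative; same exact results).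

-- ===== PORT A =====
-- 'while left > 0 and ref_seq[left - 1].upper() == base: left -= 1'
def pvLeftA (l : List Char) (base : Char) : Nat → Nat
  | 0 => 0
  | left + 1 =>
    if PySem.Chars.upperChar (PySem.List.pyGetD l (left : Int) ' ') == base then
      pvLeftA l base left
    else left + 1

-- 'while right < len(ref_seq) and ref_seq[right].upper() == base: right += 1'
def pvRightA (l : List Char) (base : Char) (right : Nat) : Nat :=
  if h : right < l.length ∧ PySem.Chars.upperChar (PySem.List.pyGetD l (right : Int) ' ') == base then
    pvRightA l base (right + 1)
  else right
termination_by l.length - right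
decreasing_by obtain ⟨h1, -⟩ := h; omega

def is_homopolymer_position_py (ref_seq : String) (rp : Int) (min_run : Int) : Bool :=
  if rp < 0 ∨ PySem.Str.len ref_seq ≤ rp then false
  else
    let base := PySem.Chars.upperChar (PySem.List.pyGetD ref_seq.toList rp ' ')
    if base == 'N' then false
    else
      let left := pvLeftA ref_seq.toList base rp.toNat
      let right := pvRightA ref_seq.toList base (rp.toNat + 1)
      decide (min_run ≤ (right : Int) - (left : Int))

-- ===== PORT B =====
-- inner loop 'while j < len(u) and u[j] == u[i]: j += 1': counts equal chars after a run head
def pvScan (c : Char) : List Char → Nat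
  | [] => 0
  | d :: rest => if d == c then pvScan c rest + 1 else 0

-- outer loop: one forward pass building runs = [(base, run_length), ...]
def pvRuns : List Char → List (Char × Nat)
  | [] => []
  | c :: rest => (c, 1 + pvScan c rest) :: pvRuns (rest.drop (pvScan c rest))
termination_by l => l.length
decreasing_by simp only [List.length_drop, List.length_cons]; omega

-- 'for base, n in runs: if idx <= rp < idx + n: return base != 'N' and n >= min_run; idx += n'
def pvFindRun (min_run rp : Int) : List (Char × Nat) → Int → Bool
  | [], _ => false
  | (b, n) :: rest, idx =>
    if idx ≤ rp ∧ rp < idx + (n : Int) then (b != 'N') && decide (min_run ≤ (n : Int))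
    else pvFindRun min_run rp rest (idx + (n : Int))

def is_homopolymer_position_py_alt (ref_seq : String) (rp : Int) (min_run : Int) : Bool :=
  if rp < 0 ∨ PySem.Str.len ref_seq ≤ rp then false
  else pvFindRun min_run rp (pvRuns (PySem.Chars.upper ref_seq.toList)) 0

-- ===== PRECONDITION & SPEC =====
def Spec_is_homopolymer_position_py (ref_seq : String) (rp : Int) (min_run : Int) (out : Bool) : Prop := out = is_homopolymer_position_py_alt ref_seq rp min_run
instance (ref_seq : String) (rp : Int) (min_run : Int) (out : Bool) : Decidable (Spec_is_homopolymer_position_py ref_seq rp min_run out) := by unfold Spec_is_homopolymer_position_py; infer_instance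

-- ===== CLAIM (what is proved, stated in full; the proofs are below) =====
def Claim_equal_is_homopolymer_position_py : Prop := ∀ (ref_seq : String) (rp : Int) (min_run : Int), Dom_is_homopolymer_position_py ref_seq rp min_run → Spec_is_homopolymer_position_py ref_seq rp min_run (is_homopolymer_position_py ref_seq rp min_run)

-- ===== LEMMAS AND PROOFS =====

-- length of the homopolymer run of the upper-cased sequence u around position p
def pvRunAt (u : List Char) (p : Nat) : Nat :=
  ((u.take p).reverse.takeWhile (· == u.getD p ' ')).length
    + ((u.drop p).takeWhile (· == u.getD p ' ')).length

theorem upper_eq_map (l : List Char) : PySem.Chars.upper l = l.map PySem.Chars.upperChar := rfl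

theorem pvScan_eq (c : Char) (l : List Char) :
    pvScan c l = (l.takeWhile (· == c)).length := by
  induction l with
  | nil => rfl
  | cons d rest ih =>
    by_cases h : d = c
    · simp [pvScan, h, ih]
    · simp [pvScan, h]

theorem drop_takeWhile_length (p : Char → Bool) (l : List Char) :
    l.drop ((l.takeWhile p).length) = l.dropWhile p := by
  induction l with
  | nil => rfl
  | cons d rest ih =>
    by_cases h : p d
    · simp [h, ih]
    · simp [h]

theorem take_takeWhile_length (p : Char → Bool) (l : List Char) :
    l.take ((l.takeWhile p).length) = l.takeWhile p := by
  induction l with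
  | nil => rfl
  | cons d rest ih =>
    by_cases h : p d
    · simp [h, ih]
    · simp [h]

theorem pvGetD_char (l : List Char) (n : Nat) (hn : n < l.length) :
    PySem.List.pyGetD l (n : Int) ' ' = l[n] := by
  simp [List.getD_eq_getElem?_getD, List.getElem?_eq_getElem hn]

theorem pvLeftA_eq (l : List Char) (base : Char) :
    ∀ left, left ≤ l.length →
      pvLeftA l base left
        = left - (((l.map PySem.Chars.upperChar).take left).reverse.takeWhile (· == base)).length := by
  intro left
  induction left with
  | zero => intro _; rfl
  | succ n ih =>
    intro h
    have hn : n < l.length := by omega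
    have htake : ((l.map PySem.Chars.upperChar).take (n + 1)).reverse
        = PySem.Chars.upperChar l[n] :: ((l.map PySem.Chars.upperChar).take n).reverse := by
      rw [List.take_succ_eq_append_getElem (by simpa using hn)]
      simp
    rw [pvLeftA, pvGetD_char l n hn, htake, List.takeWhile_cons]
    by_cases hc : PySem.Chars.upperChar l[n] == base
    · rw [if_pos hc, if_pos hc, ih (by omega)]
      simp only [List.length_cons]
      omega
    · rw [if_neg hc, if_neg hc]
      simp

theorem pvRightA_eq (l : List Char) (base : Char) (right : Nat) :
    pvRightA l base right
      = right + (((l.map PySem.Chars.upperChar).drop right).takeWhile (· == base)).length := by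
  fun_induction pvRightA l base right with
  | case1 right h ih =>
    obtain ⟨h1, h2⟩ := h
    have hdrop : (l.map PySem.Chars.upperChar).drop right
        = PySem.Chars.upperChar l[right] :: (l.map PySem.Chars.upperChar).drop (right + 1) := by
      rw [List.drop_eq_getElem_cons (show right < (l.map PySem.Chars.upperChar).length by simpa using h1)]
      simp
    rw [pvGetD_char l right h1] at h2
    rw [hdrop, List.takeWhile_cons, if_pos h2, ih]
    simp only [List.length_cons]
    omega
  | case2 right h =>
    rcases Nat.lt_or_ge right l.length with hlt | hge
    · have h2 : ¬ (PySem.Chars.upperChar (PySem.List.pyGetD l (right : Int) ' ') == base) := by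
        intro hc; exact h ⟨hlt, hc⟩
      rw [pvGetD_char l right hlt] at h2
      have hdrop : (l.map PySem.Chars.upperChar).drop right
          = PySem.Chars.upperChar l[right] :: (l.map PySem.Chars.upperChar).drop (right + 1) := by
        rw [List.drop_eq_getElem_cons (show right < (l.map PySem.Chars.upperChar).length by simpa using hlt)]
        simp
      rw [hdrop, List.takeWhile_cons, if_neg h2]
      simp
    · rw [List.drop_eq_nil_of_le (by simpa using hge)]
      simp

theorem pvFindRun_shift (mr : Int) :
    ∀ (rs : List (Char × Nat)) (rp idx : Int),
      pvFindRun mr rp rs idx = pvFindRun mr (rp - idx) rs 0 := by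
  intro rs
  induction rs with
  | nil => intro rp idx; rfl
  | cons bn rest ih =>
    intro rp idx
    obtain ⟨b, n⟩ := bn
    simp only [pvFindRun]
    have hcond : (idx ≤ rp ∧ rp < idx + (n : Int)) ↔ ((0:Int) ≤ rp - idx ∧ rp - idx < 0 + (n : Int)) := by
      omega
    by_cases hc : idx ≤ rp ∧ rp < idx + (n : Int)
    · rw [if_pos hc, if_pos (hcond.mp hc)]
    · rw [if_neg hc, if_neg (fun hx => hc (hcond.mpr hx))]
      rw [ih rp (idx + (n : Int)), ih (rp - idx) (0 + (n : Int))]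
      congr 1
      ring

theorem pvFindRun_main (mr : Int) (u : List Char) :
    ∀ (p : Nat), p < u.length →
      pvFindRun mr (p : Int) (pvRuns u) 0
        = ((u.getD p ' ' != 'N') && decide (mr ≤ (pvRunAt u p : Int))) := by
  fun_induction pvRuns u with
  | case1 => intro p hp; simp at hp
  | case2 c rest ih =>
    intro p hp
    rw [pvScan_eq, drop_takeWhile_length] at ih
    rw [pvScan_eq, drop_takeWhile_length]
    simp only [pvFindRun]
    set t := (rest.takeWhile (· == c)).length with ht
    set u' := rest.dropWhile (· == c) with hu'
    have ht_le : t ≤ rest.length := by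
      rw [ht]; exact (List.takeWhile_prefix _).length_le
    have hlenu' : u'.length = rest.length - t := by
      rw [hu', ← drop_takeWhile_length, List.length_drop, ht]
    have hulen : (c :: rest).length = rest.length + 1 := by simp
    have htakeS : (c :: rest).take (1 + t) = c :: rest.takeWhile (· == c) := by
      rw [Nat.add_comm, List.take_succ_cons, ht, take_takeWhile_length]
    have hdropS : (c :: rest).drop (1 + t) = u' := by
      rw [Nat.add_comm, List.drop_succ_cons, ht, drop_takeWhile_length, hu']
    have htlen : ((c :: rest).take (1 + t)).length = 1 + t := by
      rw [htakeS]; simp only [List.length_cons]; omega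
    have hall : ∀ x ∈ (c :: rest).take (1 + t), x == c := by
      rw [htakeS]; intro x hx
      rcases List.mem_cons.mp hx with h | h
      · simp [h]
      · exact List.mem_takeWhile_imp (p := fun y => y == c) h
    have hu'head : ∀ (h0 : 0 < u'.length), (u'[0]'h0 == c) = false := by
      intro h0
      have hne : rest.dropWhile (· == c) ≠ [] := by
        rw [← hu']; exact List.ne_nil_of_length_pos h0
      have hh := List.head_dropWhile_not (· == c) hne
      rw [List.head_eq_getElem] at hh
      simpa [← hu'] using hh
    by_cases hpt : p ≤ t
    · rw [if_pos (by constructor <;> omega)]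
      have hgetp : (c :: rest).getD p ' ' = c := by
        have hplt : p < ((c :: rest).take (1 + t)).length := by omega
        have h1 : ((c :: rest).take (1 + t))[p]'hplt ∈ (c :: rest).take (1 + t) :=
          List.getElem_mem _
        have h2 := hall _ h1
        rw [List.getElem_take] at h2
        have h3 : (c :: rest)[p] = c := by simpa using h2
        rw [List.getD_eq_getElem?_getD, List.getElem?_eq_getElem hp, Option.getD_some, h3]
      have hL : (((c :: rest).take p).reverse.takeWhile (· == c)).length = p := by
        have hsub : ∀ x ∈ ((c :: rest).take p).reverse, (x == c) = true := by
          intro x hx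
          rw [List.mem_reverse] at hx
          have hxx : x ∈ (c :: rest).take (1 + t) := by
            have heq : (c :: rest).take p = ((c :: rest).take (1 + t)).take p := by
              rw [List.take_take, Nat.min_eq_left (by omega)]
            exact List.mem_of_mem_take (heq ▸ hx)
          exact hall x hxx
        rw [List.takeWhile_eq_self_iff.mpr hsub, List.length_reverse, List.length_take,
          Nat.min_eq_left (le_of_lt hp)]
      have hR : (((c :: rest).drop p).takeWhile (· == c)).length = 1 + t - p := by
        have hsplit : (c :: rest).drop p = ((c :: rest).take (1 + t)).drop p ++ u' := by
          conv_lhs => rw [← List.take_append_drop (1 + t) (c :: rest), hdropS]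
          rw [List.drop_append_of_le_length (by omega)]
        have hnil : u'.takeWhile (· == c) = [] := by
          cases hcase : u' with
          | nil => simp
          | cons a as =>
            have h0 : 0 < u'.length := by rw [hcase]; simp
            have hhd := hu'head h0
            rw [List.takeWhile_cons]
            have : (a == c) = false := by
              have : u'[0]'h0 = a := by simp [hcase]
              rwa [this] at hhd
            rw [this]
            simp
        rw [hsplit, List.takeWhile_append_of_pos (fun a ha => hall a (List.mem_of_mem_drop ha)),
          hnil, List.length_append, List.length_drop, htlen]
        simp
      have hrun : pvRunAt (c :: rest) p = 1 + t := by
        rw [pvRunAt, hgetp, hL, hR]; omega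
      rw [hgetp, hrun]
    · rw [if_neg (by push_cast; omega)]
      rw [pvFindRun_shift]
      have hcast : (p : Int) - (0 + ((1 + t : Nat) : Int)) = ((p - (1 + t) : Nat) : Int) := by
        push_cast; omega
      obtain ⟨p', hp'⟩ : ∃ q, q = p - (1 + t) := ⟨p - (1 + t), rfl⟩
      rw [← hp'] at hcast
      have hp'lt : p' < u'.length := by omega
      rw [hcast, ih p' hp'lt]
      have hgd : (c :: rest).getD p ' ' = u'.getD p' ' ' := by
        have h1 : u'[p']? = (c :: rest)[p]? := by
          rw [← hdropS, List.getElem?_drop]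
          congr 1
          omega
        rw [List.getD_eq_getElem?_getD, List.getD_eq_getElem?_getD, h1]
      have hsplitp : (c :: rest).take p = (c :: rest).take (1 + t) ++ u'.take p' := by
        conv_lhs => rw [← List.take_append_drop (1 + t) (c :: rest), hdropS]
        rw [List.take_append, List.take_of_length_le (by omega)]
        congr 2
        omega
      have hrunEq : pvRunAt (c :: rest) p = pvRunAt u' p' := by
        rw [pvRunAt, pvRunAt, hgd]
        have hforward : (c :: rest).drop p = u'.drop p' := by
          conv_lhs => rw [show p = (1 + t) + p' by omega, ← List.drop_drop, hdropS]
        rw [hforward]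
        congr 1
        -- backward lengths agree
        rw [hsplitp, List.reverse_append, List.takeWhile_append]
        by_cases hfull : ((u'.take p').reverse.takeWhile (· == u'.getD p' ' ')).length
            = (u'.take p').reverse.length
        · rw [if_pos hfull]
          have hfull' : (u'.take p').reverse.takeWhile (· == u'.getD p' ' ')
              = (u'.take p').reverse :=
            (List.takeWhile_prefix _).eq_of_length hfull
          have h0 : 0 < u'.length := by omega
          have hbval : u'.getD p' ' ' = u'[p']'hp'lt := by
            rw [List.getD_eq_getElem?_getD, List.getElem?_eq_getElem hp'lt, Option.getD_some]
          have hbc : (u'.getD p' ' ' == c) = false := by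
            by_cases hp0 : p' = 0
            · rw [hbval]
              subst hp0
              exact hu'head h0
            · have hmem0 : u'[0]'h0 ∈ u'.take p' := by
                have hlt0 : 0 < (u'.take p').length := by
                  rw [List.length_take]; omega
                have hx : (u'.take p')[0]'hlt0 ∈ u'.take p' := List.getElem_mem _
                rwa [List.getElem_take] at hx
              have hmemr : u'[0]'h0 ∈ (u'.take p').reverse := by rwa [List.mem_reverse]
              have hsat : (u'[0]'h0 == u'.getD p' ' ') = true :=
                List.mem_takeWhile_imp (p := fun y => y == u'.getD p' ' ')
                  (by rw [hfull']; exact hmemr)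
              have heq0 : u'[0]'h0 = u'.getD p' ' ' := by simpa using hsat
              rw [← heq0]
              exact hu'head h0
          have hnil2 : (((c :: rest).take (1 + t)).reverse).takeWhile (· == u'.getD p' ' ') = [] := by
            rw [List.eq_nil_iff_forall_not_mem]
            intro x hx
            have hxb : (x == u'.getD p' ' ') = true :=
              List.mem_takeWhile_imp (p := fun y => y == u'.getD p' ' ') hx
            have hxmem : x ∈ ((c :: rest).take (1 + t)).reverse :=
              (List.takeWhile_prefix _).subset hx
            rw [List.mem_reverse] at hxmem
            have hxc : (x == c) = true := hall x hxmem
            have hx1 : x = u'.getD p' ' ' := by simpa using hxb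
            have hx2 : x = c := by simpa using hxc
            rw [← hx1, hx2] at hbc
            simp at hbc
          rw [hfull', hnil2]
          simp
        · rw [if_neg hfull]
      rw [hgd, hrunEq]

-- ===== VERDICT (by name: the statement is the Claim_ definition above) =====
theorem is_homopolymer_position_py_spec : Claim_equal_is_homopolymer_position_py := by
  intro ref_seq rp min_run _
  unfold Spec_is_homopolymer_position_py
  rw [is_homopolymer_position_py, is_homopolymer_position_py_alt]
  by_cases hg : rp < 0 ∨ PySem.Str.len ref_seq ≤ rp
  · rw [if_pos hg, if_pos hg]
  · rw [if_neg hg, if_neg hg]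
    obtain ⟨hg1, hg2⟩ := not_or.mp hg
    have hlen : PySem.Str.len ref_seq = (ref_seq.toList.length : Int) := by
      simp [pysem]
    set l := ref_seq.toList with hl
    set p := rp.toNat with hpdef
    have hrp : rp = (p : Int) := by omega
    have hplen : p < l.length := by
      rw [hlen] at hg2; omega
    have hplenu : p < (l.map PySem.Chars.upperChar).length := by simpa using hplen
    have hgdu : (l.map PySem.Chars.upperChar).getD p ' ' = PySem.Chars.upperChar l[p] := by
      rw [List.getD_eq_getElem?_getD, List.getElem?_eq_getElem hplenu, Option.getD_some,
        List.getElem_map]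
    rw [upper_eq_map, hrp,
      pvFindRun_main min_run (l.map PySem.Chars.upperChar) p hplenu, hgdu,
      pvGetD_char l p hplen]
    by_cases hN : PySem.Chars.upperChar l[p] == 'N'
    · rw [if_pos hN]
      have : (PySem.Chars.upperChar l[p] != 'N') = false := by
        simp [bne]; simpa using hN
      rw [this, Bool.false_and]
    · rw [if_neg hN]
      have hbne : (PySem.Chars.upperChar l[p] != 'N') = true := by
        simp [bne]; simpa using hN
      rw [hbne, Bool.true_and]
      rw [pvLeftA_eq l (PySem.Chars.upperChar l[p]) p (le_of_lt hplen),
        pvRightA_eq l (PySem.Chars.upperChar l[p]) (p + 1)]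
      have hL_le : (((l.map PySem.Chars.upperChar).take p).reverse.takeWhile
          (· == PySem.Chars.upperChar l[p])).length ≤ p := by
        have := (List.takeWhile_prefix
          (l := ((l.map PySem.Chars.upperChar).take p).reverse)
          (· == PySem.Chars.upperChar l[p])).length_le
        simpa [Nat.min_eq_left (le_of_lt hplen)] using this
      have hdropp : (l.map PySem.Chars.upperChar).drop p
          = PySem.Chars.upperChar l[p] :: (l.map PySem.Chars.upperChar).drop (p + 1) := by
        rw [List.drop_eq_getElem_cons hplenu]
        simp
      have hrunAt : pvRunAt (l.map PySem.Chars.upperChar) p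
          = (((l.map PySem.Chars.upperChar).take p).reverse.takeWhile
              (· == PySem.Chars.upperChar l[p])).length
            + (1 + (((l.map PySem.Chars.upperChar).drop (p + 1)).takeWhile
              (· == PySem.Chars.upperChar l[p])).length) := by
        rw [pvRunAt, hgdu, hdropp, List.takeWhile_cons, if_pos (by simp)]
        simp only [List.length_cons]
        omega
      rw [hrunAt]
      simp only [decide_eq_decide]
      omega
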